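-- pv_equiv track=rewrite | github.com/qutebrowser/qutebrowser | qutebrowser/browser/hints.py | _shuffle_hints
-- ===== SOURCE A (Python) =====
-- from typing import (TYPE_CHECKING, Callable, Dict, Iterable, Iterator, List, Mapping,
--                     MutableSequence, Optional, Sequence, Set)
--
-- _HintStringsType = MutableSequence[str]
--
-- def _shuffle_hints(hints: _HintStringsType,
--                    length: int) -> _HintStringsType:
--     """Shuffle the given set of hints so that they're scattered.
--
--     Hints starting with the same character will be spread evenly throughout
--     the array.
--
--     Inspired by Vimium.
--
--     Args:
--         hints: A list of hint strings.
--         length: Length of the available charset.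
--
--     Return:
--         A list of shuffled hint strings.
--     """
--     buckets: Sequence[_HintStringsType] = [[] for i in range(length)]
--     for i, hint in enumerate(hints):
--         buckets[i % len(buckets)].append(hint)
--     result: _HintStringsType = []
--     for bucket in buckets:
--         result += bucket
--     return result
-- ===== SOURCE B (Python) =====
-- def _shuffle_hints(hints, length):
--     return [hint for r in range(length)
--             for i, hint in enumerate(hints) if i % length == r]
-- ===== Notes on version B (the rewrite author's own statement) =====
-- stated objective: simpler
-- what changed: Replaces the mutable bucket array (scatter each hint into buckets[i % length], then concatenate) with a single nested comprehension that, for each residue r, gathers the hints whose index is congruent to r mod length.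
import Mathlib
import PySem

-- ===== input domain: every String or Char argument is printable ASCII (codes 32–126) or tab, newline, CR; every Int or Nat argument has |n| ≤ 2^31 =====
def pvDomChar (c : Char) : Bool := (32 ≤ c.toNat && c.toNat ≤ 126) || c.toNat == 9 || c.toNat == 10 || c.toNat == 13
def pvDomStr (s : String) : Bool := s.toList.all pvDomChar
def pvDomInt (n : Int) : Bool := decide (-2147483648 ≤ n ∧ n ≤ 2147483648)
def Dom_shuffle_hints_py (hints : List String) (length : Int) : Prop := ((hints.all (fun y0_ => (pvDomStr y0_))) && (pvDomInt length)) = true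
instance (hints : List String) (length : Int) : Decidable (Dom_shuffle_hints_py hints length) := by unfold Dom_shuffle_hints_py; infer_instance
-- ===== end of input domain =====

-- B gathers hints per residue class with one nested comprehension instead of scattering
-- into a mutable bucket array and concatenating (objective: simpler).

-- ===== PORT A =====
-- buckets[i % len(buckets)].append(hint); the ZeroDivisionError path (len(buckets) = 0
-- with hints nonempty, i.e. length ≤ 0) is excluded by Pre_; there the port just keeps bs.
def shuffle_hints_py (hints : List String) (length : Int) : List String :=
  let buckets0 : List (List String) := (PySem.List.pyRange 0 length 1).map (fun _ => [])
  let buckets := (PySem.List.enumerate hints 0).foldl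
    (fun bs p =>
      let m := PySem.Int.mod p.1 (bs.length : Int)
      PySem.List.pySetD bs m ((PySem.List.pyGetD bs m []) ++ [p.2]))
    buckets0
  buckets.foldl (fun acc b => acc ++ b) []

-- ===== PORT B =====
def shuffle_hints_py_alt (hints : List String) (length : Int) : List String :=
  (PySem.List.pyRange 0 length 1).foldl
    (fun acc r => acc ++
      ((PySem.List.enumerate hints 0).filter
        (fun p => PySem.Int.mod p.1 length == r)).map (fun p => p.2))
    []

-- ===== PRECONDITION & SPEC =====
-- Pre_ excludes exactly the inputs where A raises ZeroDivisionError: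
-- length ≤ 0 makes buckets empty, so i % len(buckets) raises for any hint.
def Pre_shuffle_hints_py (hints : List String) (length : Int) : Prop :=
  0 < length ∨ hints = []
instance (hints : List String) (length : Int) : Decidable (Pre_shuffle_hints_py hints length) := by
  unfold Pre_shuffle_hints_py; infer_instance

def pvWitness_shuffle_hints_py : List String × Int := (["aa", "ab", "ba", "bb", "ca"], 2)

def Spec_shuffle_hints_py (hints : List String) (length : Int) (out : List String) : Prop := out = shuffle_hints_py_alt hints length
instance (hints : List String) (length : Int) (out : List String) : Decidable (Spec_shuffle_hints_py hints length out) := by unfold Spec_shuffle_hints_py; infer_instance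

-- ===== CLAIM (what is proved, stated in full; the proofs are below) =====
def Claim_equal_shuffle_hints_py : Prop := ∀ (hints : List String) (length : Int), Dom_shuffle_hints_py hints length → Pre_shuffle_hints_py hints length → Spec_shuffle_hints_py hints length (shuffle_hints_py hints length)

-- ===== LEMMAS AND PROOFS =====

-- The core invariant of A's scatter loop: folding `enumerate xs s` (s ≥ 0) into a
-- nonempty bucket list bs appends, to bucket j, exactly the hints whose index is ≡ j.
lemma fold_buckets (xs : List String) : ∀ (s : Int), 0 ≤ s → ∀ (bs : List (List String)), 0 < bs.length →
    (PySem.List.enumerate xs s).foldl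
      (fun bs p =>
        let m := PySem.Int.mod p.1 (bs.length : Int)
        PySem.List.pySetD bs m ((PySem.List.pyGetD bs m []) ++ [p.2]))
      bs
    = bs.mapIdx (fun j b => b ++
        ((PySem.List.enumerate xs s).filter
          (fun p => PySem.Int.mod p.1 (bs.length : Int) == (j : Int))).map (fun p => p.2)) := by
  induction xs with
  | nil =>
    intro s hs bs hb
    apply List.ext_getElem
    · simp
    · intro j h1 h2
      simp [List.getElem_mapIdx, PySem.List.enumerate]
  | cons x xs ih =>
    intro s hs bs hb
    have hbpos : (0 : Int) < (bs.length : Int) := by exact_mod_cast hb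
    have hm0 : 0 ≤ PySem.Int.mod s (bs.length : Int) := PySem.Int.mod_nonneg s hbpos
    have hmlt : PySem.Int.mod s (bs.length : Int) < (bs.length : Int) := PySem.Int.mod_lt s hbpos
    set m : Int := PySem.Int.mod s (bs.length : Int) with hmdef
    have hmnat : m.toNat < bs.length := by omega
    rw [PySem.List.enumerate_cons]
    simp only [List.foldl_cons]
    rw [PySem.List.pySetD_of_nonneg _ _ hm0, PySem.List.pyGetD_of_nonneg _ _ hm0]
    have hset : 0 < (bs.set m.toNat ((bs.getD m.toNat []) ++ [x])).length := by
      simpa using hb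
    rw [ih (s + 1) (by omega) _ hset]
    simp only [List.length_set]
    apply List.ext_getElem
    · simp
    · intro j h1 h2
      have hjlt : j < bs.length := by simpa using h2
      simp only [List.getElem_mapIdx, List.getElem_set, List.filter_cons]
      have hgetD : bs.getD m.toNat [] = bs[m.toNat] := List.getD_eq_getElem bs [] hmnat
      by_cases hj : m.toNat = j
      · subst hj
        have hc : (PySem.Int.mod s ((bs.length : Nat) : Int) == ((m.toNat : Nat) : Int)) = true := by
          rw [← hmdef]; simp only [beq_iff_eq]; omega
        simp only [hc, if_true, List.map_cons]
        simp [hmnat, List.append_assoc]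
      · have hc : (PySem.Int.mod s ((bs.length : Nat) : Int) == ((j : Nat) : Int)) = false := by
          rw [← hmdef]; simp only [beq_eq_false_iff_ne]; omega
        simp only [hc, if_neg hj, if_false, Bool.false_eq_true]

-- buckets0 is replicate: mapIdx over it forgets the (empty) initial buckets.
lemma mapIdx_replicate_nil (n : Nat) (g : Nat → List String) :
    (List.replicate n ([] : List String)).mapIdx (fun j b => b ++ g j)
    = (List.range n).map g := by
  apply List.ext_getElem
  · simp
  · intro j h1 h2
    simp [List.getElem_mapIdx]

-- ===== VERDICT (by name: the statement is the Claim_ definition above) =====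
theorem shuffle_hints_py_spec : Claim_equal_shuffle_hints_py := by
  intro hints length _hdom hpre
  unfold Spec_shuffle_hints_py shuffle_hints_py shuffle_hints_py_alt
  rcases hpre with hpos | hnil
  · -- 0 < length
    obtain ⟨L, hL⟩ : ∃ L : Nat, length = (L : Int) := ⟨length.toNat, by omega⟩
    subst hL
    have hLpos : 0 < L := by exact_mod_cast hpos
    have hrange : PySem.List.pyRange 0 (L : Int) 1 = (List.range L).map (fun k : Nat => (k : Int)) := by
      rw [PySem.List.pyRange_one]
      simp only [sub_zero, Int.toNat_natCast, zero_add]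
    have hb0 : ((PySem.List.pyRange 0 (L : Int) 1).map
        (fun _ => ([] : List String))) = List.replicate L ([] : List String) := by
      rw [hrange]
      apply List.ext_getElem
      · simp
      · intro j h1 h2; simp
    simp only [hb0]
    rw [fold_buckets hints 0 (by omega) _ (by simp [hLpos])]
    simp only [List.length_replicate]
    rw [mapIdx_replicate_nil]
    rw [PySem.List.foldl_append_eq_flatMap (fun b => b), hrange,
      PySem.List.foldl_append_eq_flatMap]
    simp [List.flatMap_map]
  · -- hints = []
    subst hnil
    simp only [PySem.List.enumerate, List.foldl_nil, List.filter_nil, List.map_nil]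
    rw [PySem.List.foldl_append_eq_flatMap (fun b => b),
      PySem.List.foldl_append_eq_flatMap (fun _ => ([] : List String))]
    simp
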